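-- pv_equiv track=rewrite | github.com/elisio-alex-sousa/yolov5-kaist | aggregate_metrics.py | count_metrics
-- ===== SOURCE A (Python) =====
-- def count_metrics(in_dict):
--     n_fp = 0
--     n_tp = 0
--     n_fn = 0
--     n_tn = 0
--     n_different = 0
--     n_same = 0
--     n_missing = 0
--     for value in in_dict.values():
--         if 'TN' in value:
--             n_tn = n_tn + value['TN']
--         if 'TP' in value:
--             n_tp = n_tp + value['TP']
--         if 'FN' in value:
--             n_fn = n_fn + value['FN']
--         if 'FP' in value:
--             n_fp = n_fp + value['FP']
--         if 'Same' in value: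
--             n_same = n_same + value['Same']
--         if 'Different' in value:
--             n_different = n_different + value['Different']
--         if 'Missing' in value:
--             n_missing = n_missing + value['Missing']
--
--     return n_fp, n_tp, n_fn, n_tn, n_different, n_same, n_missing
-- ===== SOURCE B (Python) =====
-- def count_metrics(in_dict):
--     def total(name):
--         return sum(v[name] for v in in_dict.values() if name in v)
--     return (total('FP'), total('TP'), total('FN'), total('TN'),
--             total('Different'), total('Same'), total('Missing'))
-- ===== Notes on version B (the rewrite author's own statement) =====
-- stated objective: simpler
-- what changed: Replaces A's single loop threading seven scalar accumulators with seven independent staged passes, each a one-line sum over the values for one metric name.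
import Mathlib
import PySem

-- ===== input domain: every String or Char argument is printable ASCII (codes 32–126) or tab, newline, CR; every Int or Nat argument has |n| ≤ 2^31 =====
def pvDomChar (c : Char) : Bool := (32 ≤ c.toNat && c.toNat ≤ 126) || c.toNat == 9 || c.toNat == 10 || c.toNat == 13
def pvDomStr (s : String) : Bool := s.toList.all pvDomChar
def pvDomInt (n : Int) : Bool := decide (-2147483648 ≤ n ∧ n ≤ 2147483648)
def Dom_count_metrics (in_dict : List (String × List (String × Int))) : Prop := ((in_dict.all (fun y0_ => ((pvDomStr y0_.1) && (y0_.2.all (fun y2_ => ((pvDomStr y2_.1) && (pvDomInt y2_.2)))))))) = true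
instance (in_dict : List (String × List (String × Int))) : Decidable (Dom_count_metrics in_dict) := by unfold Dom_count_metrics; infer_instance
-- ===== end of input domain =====

-- B replaces A's single loop threading seven scalar accumulators by seven independent
-- staged passes, one sum per metric name (simpler decomposition, not faster).

-- ===== PORT A =====
-- loop body of A's 'for value in in_dict.values()' (state = the seven counters in declaration order)
def stepA (s : Int × Int × Int × Int × Int × Int × Int) (p : String × List (String × Int)) :
    Int × Int × Int × Int × Int × Int × Int :=
  let value : PySem.Dict String Int := PySem.Dict.mk p.2
  let (n_fp, n_tp, n_fn, n_tn, n_different, n_same, n_missing) := s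
  let n_tn := if value.contains "TN" then n_tn + (value.get? "TN").getD 0 else n_tn
  let n_tp := if value.contains "TP" then n_tp + (value.get? "TP").getD 0 else n_tp
  let n_fn := if value.contains "FN" then n_fn + (value.get? "FN").getD 0 else n_fn
  let n_fp := if value.contains "FP" then n_fp + (value.get? "FP").getD 0 else n_fp
  let n_same := if value.contains "Same" then n_same + (value.get? "Same").getD 0 else n_same
  let n_different := if value.contains "Different" then n_different + (value.get? "Different").getD 0 else n_different
  let n_missing := if value.contains "Missing" then n_missing + (value.get? "Missing").getD 0 else n_missing
  (n_fp, n_tp, n_fn, n_tn, n_different, n_same, n_missing)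

def count_metrics (in_dict : List (String × List (String × Int))) : Int × Int × Int × Int × Int × Int × Int :=
  in_dict.foldl stepA (0, 0, 0, 0, 0, 0, 0)

-- ===== PORT B =====
-- B's helper 'total(name)': sum(v[name] for v in in_dict.values() if name in v)
def totalB (in_dict : List (String × List (String × Int))) (name : String) : Int :=
  (((in_dict.filter (fun p => (PySem.Dict.mk p.2).contains name)).map
      (fun p => ((PySem.Dict.mk p.2).get? name).getD 0)).sum)

def count_metrics_alt (in_dict : List (String × List (String × Int))) : Int × Int × Int × Int × Int × Int × Int :=
  (totalB in_dict "FP", totalB in_dict "TP", totalB in_dict "FN", totalB in_dict "TN",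
   totalB in_dict "Different", totalB in_dict "Same", totalB in_dict "Missing")

-- ===== PRECONDITION & SPEC =====
-- (no Pre_: A is total on this type)
def Spec_count_metrics (in_dict : List (String × List (String × Int))) (out : Int × Int × Int × Int × Int × Int × Int) : Prop := out = count_metrics_alt in_dict
instance (in_dict : List (String × List (String × Int))) (out : Int × Int × Int × Int × Int × Int × Int) : Decidable (Spec_count_metrics in_dict out) := by unfold Spec_count_metrics; infer_instance

-- ===== CLAIM =====
def Claim_equal_count_metrics : Prop := ∀ (in_dict : List (String × List (String × Int))), Dom_count_metrics in_dict → Spec_count_metrics in_dict (count_metrics in_dict)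

-- ===== LEMMAS AND PROOFS =====

-- total of metric n over all inner dicts (first-match lookup)
def tot (n : String) (xs : List (String × List (String × Int))) : Int :=
  (xs.map (fun p => (PySem.Dict.mk p.2).getD n 0)).sum

theorem foldl_stepA (xs : List (String × List (String × Int))) :
    ∀ a b c t e f g : Int,
      xs.foldl stepA (a, b, c, t, e, f, g) =
        (a + tot "FP" xs, b + tot "TP" xs, c + tot "FN" xs, t + tot "TN" xs,
         e + tot "Different" xs, f + tot "Same" xs, g + tot "Missing" xs) := by
  induction xs with
  | nil => intro a b c t e f g; simp [tot]
  | cons p xs ih =>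
    intro a b c t e f g
    have hstep : ∀ (n : String) (acc : Int),
        (if (PySem.Dict.mk p.2).contains n = true
         then acc + ((PySem.Dict.mk p.2).get? n).getD 0 else acc)
          = acc + (PySem.Dict.mk p.2).getD n 0 := by
      intro n acc
      by_cases hc : (PySem.Dict.mk p.2).contains n = true
      · rw [if_pos hc, PySem.Dict.getD_eq_get?_getD]
      · rw [if_neg hc,
          PySem.Dict.getD_of_not_contains _ _ (Bool.eq_false_iff.mpr hc)]
        ring
    have hone : stepA (a, b, c, t, e, f, g) p =
        (a + (PySem.Dict.mk p.2).getD "FP" 0, b + (PySem.Dict.mk p.2).getD "TP" 0,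
         c + (PySem.Dict.mk p.2).getD "FN" 0, t + (PySem.Dict.mk p.2).getD "TN" 0,
         e + (PySem.Dict.mk p.2).getD "Different" 0, f + (PySem.Dict.mk p.2).getD "Same" 0,
         g + (PySem.Dict.mk p.2).getD "Missing" 0) := by
      unfold stepA
      simp only [hstep]
    rw [List.foldl_cons, hone, ih]
    simp only [tot, List.map_cons, List.sum_cons, Prod.mk.injEq]
    refine ⟨by ring, by ring, by ring, by ring, by ring, by ring, by ring⟩

theorem totalB_eq_tot (xs : List (String × List (String × Int))) (n : String) :
    totalB xs n = tot n xs := by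
  induction xs with
  | nil => rfl
  | cons p xs ih =>
    unfold totalB tot
    rw [List.filter_cons]
    by_cases hc : (PySem.Dict.mk p.2).contains n = true
    · rw [if_pos (by simpa using hc)]
      simp only [List.map_cons, List.sum_cons]
      rw [PySem.Dict.getD_eq_get?_getD]
      exact congrArg _ (by simpa [totalB, tot] using ih)
    · rw [if_neg (by simpa using hc)]
      simp only [List.map_cons, List.sum_cons]
      rw [PySem.Dict.getD_of_not_contains _ _ (Bool.eq_false_iff.mpr hc), zero_add]
      simpa [totalB, tot] using ih

-- ===== VERDICT =====
theorem count_metrics_spec : Claim_equal_count_metrics := by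
  intro xs _
  unfold Spec_count_metrics count_metrics count_metrics_alt
  rw [foldl_stepA]
  simp only [zero_add, totalB_eq_tot]
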